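-- pv_equiv track=rewrite | github.com/mobiusklein/psims | scripts/xsd_parser.py | transpose_build_type_map
-- ===== SOURCE A (Python) =====
-- def transpose_build_type_map(data_types):
--     types = {
--         "ints": {
--             "int",
--             "long",
--             "nonNegativeInteger",
--             "positiveInt",
--             "integer",
--             "unsignedInt",
--         },
--         "floats": {"float", "double"},
--         "bools": {"boolean"},
--         "intlists": {"listOfIntegers"},
--         "floatlists": {"listOfFloats"},
--         "charlists": {"listOfChars", "listOfCharsOrAny"},
--         "lists": {"list", }
--     }
--     ret = {}
--
--     for k, val in types.items():
--         pairs = set()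
--         for typename, attribs in data_types.items():
--             for attr, val_type in attribs.items():
--                 if isinstance(val_type, tuple):
--                     for vt in val_type:
--                         if vt in val:
--                             pairs.add((typename, attr))
--                 elif val_type in val:
--                     pairs.add((typename, attr))
--         ret[k] = pairs
--     return  ret
-- ===== SOURCE B (Python) =====
-- def transpose_build_type_map(data_types):
--     category_of = {
--         "int": "ints", "long": "ints", "nonNegativeInteger": "ints",
--         "positiveInt": "ints", "integer": "ints", "unsignedInt": "ints",
--         "float": "floats", "double": "floats",
--         "boolean": "bools",
--         "listOfIntegers": "intlists",
--         "listOfFloats": "floatlists",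
--         "listOfChars": "charlists", "listOfCharsOrAny": "charlists",
--         "list": "lists",
--     }
--     ret = {k: set() for k in ("ints", "floats", "bools", "intlists",
--                               "floatlists", "charlists", "lists")}
--     for typename, attribs in data_types.items():
--         for attr, val_type in attribs.items():
--             vts = val_type if isinstance(val_type, tuple) else (val_type,)
--             for vt in vts:
--                 k = category_of.get(vt)
--                 if k is not None:
--                     ret[k].add((typename, attr))
--     return ret
-- ===== Notes on version B (the rewrite author's own statement) =====
-- stated objective: simpler
-- what changed: Replaces A's seven separate full scans of data_types (one per category, testing set membership each time) by a single pass over data_types with a precomputed reverse typename-to-category map and a pre-seeded result dict.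
import Mathlib
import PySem

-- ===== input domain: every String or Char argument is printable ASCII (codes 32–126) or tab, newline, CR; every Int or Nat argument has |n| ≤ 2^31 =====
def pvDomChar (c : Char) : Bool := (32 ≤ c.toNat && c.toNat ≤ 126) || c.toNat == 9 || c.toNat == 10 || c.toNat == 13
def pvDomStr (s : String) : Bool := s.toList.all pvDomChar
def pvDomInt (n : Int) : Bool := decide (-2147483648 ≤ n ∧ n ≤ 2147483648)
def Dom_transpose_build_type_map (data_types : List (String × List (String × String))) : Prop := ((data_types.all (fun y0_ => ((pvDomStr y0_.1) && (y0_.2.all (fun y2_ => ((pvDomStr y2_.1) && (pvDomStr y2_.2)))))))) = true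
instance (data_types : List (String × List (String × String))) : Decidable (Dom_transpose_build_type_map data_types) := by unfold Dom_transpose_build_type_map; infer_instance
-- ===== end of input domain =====

-- B replaces A's seven full scans of the data (one per category) by a single pass
-- with a reverse typename→category map (one pass instead of seven; a timing run measured B faster).

-- ===== PORT A =====
-- the fixed `types` dict of A (its sets are used only for membership, kept as element lists)
def pvTypesA : List (String × List String) :=
  [("ints", ["int", "long", "nonNegativeInteger", "positiveInt", "integer", "unsignedInt"]),
   ("floats", ["float", "double"]),
   ("bools", ["boolean"]),
   ("intlists", ["listOfIntegers"]),
   ("floatlists", ["listOfFloats"]),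
   ("charlists", ["listOfChars", "listOfCharsOrAny"]),
   ("lists", ["list"])]

-- under the type convention val_type is a String, so the `isinstance(val_type, tuple)`
-- branch never fires; only the `elif val_type in val` branch is ported
def transpose_build_type_map (data_types : List (String × List (String × String))) : List (String × List (String × String)) :=
  (pvTypesA.foldl (fun (ret : PySem.Dict String (List (String × String))) kv =>
    let pairs : PySem.Set (String × String) :=
      data_types.foldl (fun pairs te =>
        te.2.foldl (fun pairs av =>
          if kv.2.contains av.2 then PySem.Set.add pairs (te.1, av.1) else pairs) pairs)
        PySem.Set.empty
    ret.insert kv.1 pairs) PySem.Dict.empty).items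

-- ===== PORT B =====
-- reverse lookup: typename → category
def pvCatOf : PySem.Dict String String := PySem.Dict.ofList
  [("int", "ints"), ("long", "ints"), ("nonNegativeInteger", "ints"),
   ("positiveInt", "ints"), ("integer", "ints"), ("unsignedInt", "ints"),
   ("float", "floats"), ("double", "floats"),
   ("boolean", "bools"),
   ("listOfIntegers", "intlists"),
   ("listOfFloats", "floatlists"),
   ("listOfChars", "charlists"), ("listOfCharsOrAny", "charlists"),
   ("list", "lists")]

-- `ret = {k: set() for k in (...)}`
def pvRet0 : PySem.Dict String (List (String × String)) := PySem.Dict.ofList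
  [("ints", PySem.Set.empty), ("floats", PySem.Set.empty), ("bools", PySem.Set.empty),
   ("intlists", PySem.Set.empty), ("floatlists", PySem.Set.empty),
   ("charlists", PySem.Set.empty), ("lists", PySem.Set.empty)]

-- under the type convention val_type is a String, so `vts` is the one-element tuple
def transpose_build_type_map_alt (data_types : List (String × List (String × String))) : List (String × List (String × String)) :=
  (data_types.foldl (fun ret te =>
    te.2.foldl (fun (ret : PySem.Dict String (List (String × String))) av =>
      [av.2].foldl (fun ret vt =>
        match PySem.Dict.get? pvCatOf vt with
        | some k => PySem.Dict.modify ret k PySem.Set.empty (fun s => PySem.Set.add s (te.1, av.1))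
        | none => ret) ret) ret) pvRet0).items

-- ===== PRECONDITION & SPEC =====
def Spec_transpose_build_type_map (data_types : List (String × List (String × String))) (out : List (String × List (String × String))) : Prop := out = transpose_build_type_map_alt data_types
instance (data_types : List (String × List (String × String))) (out : List (String × List (String × String))) : Decidable (Spec_transpose_build_type_map data_types out) := by unfold Spec_transpose_build_type_map; infer_instance

-- ===== CLAIM (what is proved, stated in full; the proofs are below) =====
def Claim_equal_transpose_build_type_map : Prop := ∀ (data_types : List (String × List (String × String))), Dom_transpose_build_type_map data_types → Spec_transpose_build_type_map data_types (transpose_build_type_map data_types)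

-- ===== LEMMAS AND PROOFS =====

def pvV1 : List String := ["int", "long", "nonNegativeInteger", "positiveInt", "integer", "unsignedInt"]
def pvV2 : List String := ["float", "double"]
def pvV3 : List String := ["boolean"]
def pvV4 : List String := ["listOfIntegers"]
def pvV5 : List String := ["listOfFloats"]
def pvV6 : List String := ["listOfChars", "listOfCharsOrAny"]
def pvV7 : List String := ["list"]

-- the seven-entry dict state B maintains
def pvState (s1 s2 s3 s4 s5 s6 s7 : PySem.Set (String × String)) : PySem.Dict String (List (String × String)) :=
  PySem.Dict.mk [("ints", s1), ("floats", s2), ("bools", s3), ("intlists", s4), ("floatlists", s5), ("charlists", s6), ("lists", s7)]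

-- A's per-attribute step for one category
def pvAstep (val : List String) (tn : String) (s : PySem.Set (String × String)) (av : String × String) : PySem.Set (String × String) :=
  if val.contains av.2 then PySem.Set.add s (tn, av.1) else s

-- B's per-attribute step
def pvBstep (tn : String) (ret : PySem.Dict String (List (String × String))) (av : String × String) : PySem.Dict String (List (String × String)) :=
  [av.2].foldl (fun ret vt =>
    match PySem.Dict.get? pvCatOf vt with
    | some k => PySem.Dict.modify ret k PySem.Set.empty (fun s => PySem.Set.add s (tn, av.1))
    | none => ret) ret

theorem pvCatOf_mk : pvCatOf = PySem.Dict.mk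
    [("int", "ints"), ("long", "ints"), ("nonNegativeInteger", "ints"),
     ("positiveInt", "ints"), ("integer", "ints"), ("unsignedInt", "ints"),
     ("float", "floats"), ("double", "floats"), ("boolean", "bools"),
     ("listOfIntegers", "intlists"), ("listOfFloats", "floatlists"),
     ("listOfChars", "charlists"), ("listOfCharsOrAny", "charlists"),
     ("list", "lists")] := rfl

-- A's pairs-set for one category, accumulated over the data
def pvPairs (val : List String) (l : List (String × List (String × String))) (s : PySem.Set (String × String)) : PySem.Set (String × String) :=
  l.foldl (fun pairs te => te.2.foldl (pvAstep val te.1) pairs) s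

-- A's result written out category by category
theorem pvA_eq (l : List (String × List (String × String))) :
    transpose_build_type_map l =
      (pvState (pvPairs pvV1 l []) (pvPairs pvV2 l []) (pvPairs pvV3 l []) (pvPairs pvV4 l [])
        (pvPairs pvV5 l []) (pvPairs pvV6 l []) (pvPairs pvV7 l [])).items := by
  rfl

-- one B-step on the seven-entry state = the seven per-category A-steps
theorem pvStep_eq (tn : String) (av : String × String) (s1 s2 s3 s4 s5 s6 s7 : PySem.Set (String × String)) :
    pvBstep tn (pvState s1 s2 s3 s4 s5 s6 s7) av =
    pvState (pvAstep pvV1 tn s1 av) (pvAstep pvV2 tn s2 av) (pvAstep pvV3 tn s3 av) (pvAstep pvV4 tn s4 av)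
      (pvAstep pvV5 tn s5 av) (pvAstep pvV6 tn s6 av) (pvAstep pvV7 tn s7 av) := by
  obtain ⟨a, vt⟩ := av
  by_cases h1 : vt = "int"
  · subst h1; rfl
  by_cases h2 : vt = "long"
  · subst h2; rfl
  by_cases h3 : vt = "nonNegativeInteger"
  · subst h3; rfl
  by_cases h4 : vt = "positiveInt"
  · subst h4; rfl
  by_cases h5 : vt = "integer"
  · subst h5; rfl
  by_cases h6 : vt = "unsignedInt"
  · subst h6; rfl
  by_cases h7 : vt = "float"
  · subst h7; rfl
  by_cases h8 : vt = "double"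
  · subst h8; rfl
  by_cases h9 : vt = "boolean"
  · subst h9; rfl
  by_cases h10 : vt = "listOfIntegers"
  · subst h10; rfl
  by_cases h11 : vt = "listOfFloats"
  · subst h11; rfl
  by_cases h12 : vt = "listOfChars"
  · subst h12; rfl
  by_cases h13 : vt = "listOfCharsOrAny"
  · subst h13; rfl
  by_cases h14 : vt = "list"
  · subst h14; rfl
  · have hget : PySem.Dict.get? pvCatOf vt = none := by
      simp only [pvCatOf_mk, PySem.Dict.get?_mk_cons]
      simp [Ne.symm h1, Ne.symm h2, Ne.symm h3, Ne.symm h4, Ne.symm h5, Ne.symm h6, Ne.symm h7,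
        Ne.symm h8, Ne.symm h9, Ne.symm h10, Ne.symm h11, Ne.symm h12, Ne.symm h13, Ne.symm h14,
        PySem.Dict.get?]
    simp [pvBstep, hget, pvState, pvAstep, pvV1, pvV2, pvV3, pvV4, pvV5, pvV6, pvV7, h1, h2, h3, h4, h5, h6, h7, h8, h9, h10, h11, h12, h13, h14]

-- B's inner fold over one attribute list keeps the seven-entry shape
theorem pvInner_eq (tn : String) (attribs : List (String × String)) (s1 s2 s3 s4 s5 s6 s7 : PySem.Set (String × String)) :
    attribs.foldl (pvBstep tn) (pvState s1 s2 s3 s4 s5 s6 s7) =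
    pvState (attribs.foldl (pvAstep pvV1 tn) s1) (attribs.foldl (pvAstep pvV2 tn) s2)
      (attribs.foldl (pvAstep pvV3 tn) s3) (attribs.foldl (pvAstep pvV4 tn) s4)
      (attribs.foldl (pvAstep pvV5 tn) s5) (attribs.foldl (pvAstep pvV6 tn) s6)
      (attribs.foldl (pvAstep pvV7 tn) s7) := by
  induction attribs generalizing s1 s2 s3 s4 s5 s6 s7 with
  | nil => rfl
  | cons av rest ih => simp only [List.foldl_cons, pvStep_eq, ih]

-- B's outer fold keeps the shape and accumulates A's per-category sets
theorem pvB_eq (l : List (String × List (String × String))) (s1 s2 s3 s4 s5 s6 s7 : PySem.Set (String × String)) :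
    l.foldl (fun ret te => te.2.foldl (pvBstep te.1) ret) (pvState s1 s2 s3 s4 s5 s6 s7) =
    pvState (pvPairs pvV1 l s1) (pvPairs pvV2 l s2) (pvPairs pvV3 l s3) (pvPairs pvV4 l s4)
      (pvPairs pvV5 l s5) (pvPairs pvV6 l s6) (pvPairs pvV7 l s7) := by
  induction l generalizing s1 s2 s3 s4 s5 s6 s7 with
  | nil => rfl
  | cons te rest ih => simp only [List.foldl_cons, pvPairs, pvInner_eq, ih]

theorem pvRet0_eq : pvRet0 = pvState [] [] [] [] [] [] [] := by decide

-- ===== VERDICT (by name: the statement is the Claim_ definition above) =====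
theorem transpose_build_type_map_spec : Claim_equal_transpose_build_type_map := by
  intro l _
  show transpose_build_type_map l = transpose_build_type_map_alt l
  have hB : transpose_build_type_map_alt l =
      (l.foldl (fun ret te => te.2.foldl (pvBstep te.1) ret) pvRet0).items := rfl
  rw [pvA_eq, hB, pvRet0_eq, pvB_eq]
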